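-- pv_equiv track=rewrite | github.com/MatchaDesu/PSCP | 215_CaesarV2.py | find_rotate
-- ===== SOURCE A (Python) =====
-- def caesar(letter,num) :
--     "Return letter"
--     new_text = ""
--
--     for i in letter :
--         if i.isalpha() :
--             if ord(i.upper()) + num < 65 :
--                 i = chr(ord(i) + num + 26)
--             elif ord(i.upper()) + num > 90 :
--                 i = chr(ord(i) + num - 26)
--             else :
--                 i = chr(ord(i) + num)
--             new_text += i
--
--     return new_text.lower()
--
-- def find_rotate(text) :
--     "return how many times to rotate"
--     word = ["what", "when", "why", "which", "this", "there", "where", "the", "is", "am", "are",\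
--          "you", "we", "they", "he", "she", "it"]
--     text = text.split()
--
--     for i in text :
--         for num in range(1,26) :
--             if caesar(i,num) in word :
--                 return num
--
--     return 0
-- ===== SOURCE B (Python) =====
-- _WORDS = ["what", "when", "why", "which", "this", "there", "where", "the", "is", "am", "are",
--           "you", "we", "they", "he", "she", "it"]
--
--
-- def _shift(num, c):
--     # c is a lowercase letter; rotate it forward by num (1..25) with wraparound
--     o = ord(c) + num
--     return chr(o - 26) if o > 122 else chr(o)
--
--
-- def _norm(word):
--     # what caesar() keeps of a word: its alphabetic chars, lowercased
--     return "".join(ch.lower() for ch in word if ch.isalpha())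
--
--
-- def _build_table():
--     # table[k] = smallest s in 1..25 such that rotating k by s gives a dictionary
--     # word; iterate s descending so that smaller s overwrites on collisions
--     table = {}
--     for s in range(25, 0, -1):
--         for d in _WORDS:
--             table["".join(_shift(26 - s, c) for c in d)] = s
--     return table
--
--
-- _TABLE = _build_table()
--
--
-- def find_rotate(text):
--     "return how many times to rotate"
--     for w in text.split():
--         s = _TABLE.get(_norm(w))
--         if s is not None:
--             return s
--     return 0
-- ===== Notes on version B (the rewrite author's own statement) =====
-- stated objective: faster
-- what changed: Instead of trying all 25 rotations of every text word against the 17-word list, B builds a reverse lookup table once (each dictionary word rotated back by every shift, smaller shifts overwriting on collisions) and answers each word with one normalization pass plus a single dict lookup.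
import Mathlib
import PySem

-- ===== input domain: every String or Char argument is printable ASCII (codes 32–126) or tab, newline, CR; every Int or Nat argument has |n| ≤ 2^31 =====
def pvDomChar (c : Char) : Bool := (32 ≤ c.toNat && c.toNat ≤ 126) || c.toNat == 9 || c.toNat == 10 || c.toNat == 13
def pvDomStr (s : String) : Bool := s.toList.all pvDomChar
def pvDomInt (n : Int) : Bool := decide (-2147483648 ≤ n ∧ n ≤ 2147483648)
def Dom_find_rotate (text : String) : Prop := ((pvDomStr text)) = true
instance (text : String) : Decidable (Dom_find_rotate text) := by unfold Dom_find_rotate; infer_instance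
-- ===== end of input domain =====

-- B replaces A's per-word scan over all 25 rotations of the word list by a single lookup of the
-- word's normalized form in a reverse table built once (objective: faster by a constant factor).

-- ===== PORT A =====

-- chr(n) for the in-range code points caesar produces (exact there)
def pvChr (n : Int) : Char := Char.ofNat n.toNat

-- the body of caesar's `if i.isalpha():` branch — the reassignment of i
def caesarChar (num : Int) (i : Char) : Char :=
  if ((PySem.Chars.upperChar i).toNat : Int) + num < 65 then pvChr ((i.toNat : Int) + num + 26)
  else if ((PySem.Chars.upperChar i).toNat : Int) + num > 90 then pvChr ((i.toNat : Int) + num - 26)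
  else pvChr ((i.toNat : Int) + num)

def caesar (letter : String) (num : Int) : String :=
  let new_text := letter.toList.foldl
    (fun new_text i =>
      if PySem.Chars.isalpha i then new_text ++ [caesarChar num i] else new_text) []
  String.ofList (PySem.Chars.lower new_text)

def pvWordA : List String :=
  ["what", "when", "why", "which", "this", "there", "where", "the", "is", "am", "are",
   "you", "we", "they", "he", "she", "it"]

-- inner `for num in range(1,26): if caesar(i,num) in word: return num`
def frInnerA (i : String) : List Int → Option Int
  | [] => none
  | num :: rest => if pvWordA.contains (caesar i num) then some num else frInnerA i rest

-- outer `for i in text: … return 0`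
def frOuterA : List String → Int
  | [] => 0
  | i :: rest =>
    match frInnerA i (PySem.List.pyRange 1 26 1) with
    | some num => num
    | none => frOuterA rest

def find_rotate (text : String) : Int := frOuterA (PySem.Str.split₀ text)

-- ===== PORT B =====

def pvWordsB : List String :=
  ["what", "when", "why", "which", "this", "there", "where", "the", "is", "am", "are",
   "you", "we", "they", "he", "she", "it"]

-- _shift(num, c): rotate a lowercase letter forward by num with wraparound
def pvShiftC (num : Int) (c : Char) : Char :=
  if ((c.toNat : Int) + num) > 122 then Char.ofNat ((c.toNat : Int) + num - 26).toNat
  else Char.ofNat ((c.toNat : Int) + num).toNat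

-- _norm(word): the alphabetic chars of word, lowercased
def pvNormStr (w : String) : String :=
  String.ofList ((w.toList.filter PySem.Chars.isalpha).map PySem.Chars.lowerChar)

-- the table key "".join(_shift(26 - s, c) for c in d)
def pvKey (s : Int) (d : String) : String :=
  String.ofList (d.toList.map (pvShiftC (26 - s)))

-- _build_table(): s descending so that smaller s overwrites on collisions
def pvTable : PySem.Dict String Int :=
  (PySem.List.pyRange 25 0 (-1)).foldl
    (fun t s => pvWordsB.foldl (fun t d => t.insert (pvKey s d) s) t)
    PySem.Dict.empty

-- `if s is not None: return s` — continue with the rest of the loop otherwise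
def pvIfSome (s : Option Int) (k : Int) : Int :=
  match s with
  | some v => v
  | none => k

-- `for w in text.split(): s = _TABLE.get(_norm(w)); if s is not None: return s`
def frOuterB : List String → Int
  | [] => 0
  | w :: rest => pvIfSome (pvTable.get? (pvNormStr w)) (frOuterB rest)

def find_rotate_alt (text : String) : Int := frOuterB (PySem.Str.split₀ text)

-- ===== PRECONDITION & SPEC =====
def Spec_find_rotate (text : String) (out : Int) : Prop := out = find_rotate_alt text
instance (text : String) (out : Int) : Decidable (Spec_find_rotate text out) := by unfold Spec_find_rotate; infer_instance

-- ===== CLAIM (what is proved, stated in full; the proofs are below) =====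
def Claim_equal_find_rotate : Prop := ∀ (text : String), Dom_find_rotate text → Spec_find_rotate text (find_rotate text)

-- ===== LEMMAS AND PROOFS =====

-- `hitL ds x s` : some word d in ds has x as its pre-image under rotation by s
def hitL (ds : List String) (x : List Char) (s : Int) : Bool :=
  ds.any (fun d => x == d.toList.map (pvShiftC (26 - s)))

-- first s in the list whose rotation of x lands in the word list
def firstHit (x : List Char) : List Int → Option Int
  | [] => none
  | s :: l => if hitL pvWordsB x s then some s else firstHit x l

-- bounds extracted from the PySem character classes
theorem isalpha_bounds (c : Char) (h : PySem.Chars.isalpha c = true) :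
    65 ≤ c.toNat ∧ c.toNat ≤ 122 := by
  simp [PySem.Chars.isalpha, PySem.Chars.isupper, PySem.Chars.islower, Char.le_def] at h
  rcases h with ⟨h1, h2⟩ | ⟨h1, h2⟩ <;>
    (rw [UInt32.le_iff_toNat_le] at h1 h2; simp at h1 h2;
     have e : c.toNat = c.val.toNat := rfl; omega)

theorem islower_bounds (c : Char) (h : PySem.Chars.islower c = true) :
    97 ≤ c.toNat ∧ c.toNat ≤ 122 := by
  simp [PySem.Chars.islower, Char.le_def] at h
  obtain ⟨h1, h2⟩ := h
  rw [UInt32.le_iff_toNat_le] at h1 h2; simp at h1 h2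
  have e : c.toNat = c.val.toNat := rfl; omega

-- character-level facts, checked over all relevant code points
set_option maxRecDepth 4096 in
theorem shiftC_inv : ∀ (k : Fin 123) (m : Fin 26), 97 ≤ k.val → 1 ≤ m.val →
    pvShiftC (26 - (m.val : Int)) (pvShiftC (m.val : Int) (Char.ofNat k.val)) = Char.ofNat k.val := by
  decide

set_option maxRecDepth 4096 in
theorem shiftC_inv' : ∀ (k : Fin 123) (m : Fin 26), 97 ≤ k.val → 1 ≤ m.val →
    pvShiftC (m.val : Int) (pvShiftC (26 - (m.val : Int)) (Char.ofNat k.val)) = Char.ofNat k.val := by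
  decide

set_option maxRecDepth 4096 in
theorem caesarChar_eq : ∀ (k : Fin 123) (m : Fin 26), 1 ≤ m.val →
    PySem.Chars.isalpha (Char.ofNat k.val) = true →
    PySem.Chars.lowerChar (caesarChar (m.val : Int) (Char.ofNat k.val)) =
      pvShiftC (m.val : Int) (PySem.Chars.lowerChar (Char.ofNat k.val)) := by
  decide

set_option maxRecDepth 4096 in
theorem lowerChar_islower : ∀ (k : Fin 123), PySem.Chars.isalpha (Char.ofNat k.val) = true →
    PySem.Chars.islower (PySem.Chars.lowerChar (Char.ofNat k.val)) = true := by
  decide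

theorem norm_all_islower (w : String) :
    ((pvNormStr w).toList.all PySem.Chars.islower) = true := by
  simp only [pvNormStr, String.toList_ofList, List.all_eq_true]
  intro c hc
  obtain ⟨a, ha, rfl⟩ := List.mem_map.mp hc
  have halpha : PySem.Chars.isalpha a = true := (List.mem_filter.mp ha).2
  have hb := isalpha_bounds a halpha
  have e : a = Char.ofNat a.toNat := (Char.ofNat_toNat a).symm
  rw [e]
  exact lowerChar_islower ⟨a.toNat, by omega⟩ (by rw [← e]; exact halpha)

-- caesar, on shift 1 ≤ num < 26, rotates the normalized word
theorem caesar_eq (i : String) (num : Int) (h1 : 1 ≤ num) (h2 : num < 26) :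
    caesar i num = String.ofList ((pvNormStr i).toList.map (pvShiftC num)) := by
  unfold caesar
  rw [PySem.List.foldl_append_if PySem.Chars.isalpha (caesarChar num) i.toList []]
  simp only [List.nil_append, pvNormStr, String.toList_ofList, PySem.Chars.lower,
    List.map_map]
  congr 1
  apply List.map_congr_left
  intro c hc
  have halpha : PySem.Chars.isalpha c = true := (List.mem_filter.mp hc).2
  have hb := isalpha_bounds c halpha
  have e : c = Char.ofNat c.toNat := (Char.ofNat_toNat c).symm
  have en : ((num.toNat : Nat) : Int) = num := Int.toNat_of_nonneg (by omega)
  have := caesarChar_eq ⟨c.toNat, by omega⟩ ⟨num.toNat, by omega⟩ (by simp; omega)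
    (by rw [← e]; exact halpha)
  simp only [Function.comp_apply]
  rw [e, ← en]
  exact this

-- rotating x by num gives d exactly when x is d rotated back (both all-lowercase)
theorem rotate_eq_iff (x : List Char) (hx : x.all PySem.Chars.islower = true)
    (d : List Char) (hd : d.all PySem.Chars.islower = true)
    (num : Int) (h1 : 1 ≤ num) (h2 : num < 26) :
    x.map (pvShiftC num) = d ↔ x = d.map (pvShiftC (26 - num)) := by
  have en : ((num.toNat : Nat) : Int) = num := Int.toNat_of_nonneg (by omega)
  constructor
  · intro h
    have hx2 : x = (x.map (pvShiftC num)).map (pvShiftC (26 - num)) := by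
      rw [List.map_map]
      conv_lhs => rw [← List.map_id x]
      apply List.map_congr_left
      intro c hc
      have hcl := islower_bounds c (List.all_eq_true.mp hx c hc)
      have e : c = Char.ofNat c.toNat := (Char.ofNat_toNat c).symm
      simp only [Function.comp_apply, id_eq]
      rw [e, ← en]
      exact (shiftC_inv ⟨c.toNat, by omega⟩ ⟨num.toNat, by omega⟩ (by simp; omega)
        (by simp; omega)).symm
    rw [hx2, h]
  · intro h
    rw [h, List.map_map]
    conv_rhs => rw [← List.map_id d]
    apply List.map_congr_left
    intro c hc
    have hcl := islower_bounds c (List.all_eq_true.mp hd c hc)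
    have e : c = Char.ofNat c.toNat := (Char.ofNat_toNat c).symm
    simp only [Function.comp_apply, id_eq]
    rw [e, ← en]
    exact shiftC_inv' ⟨c.toNat, by omega⟩ ⟨num.toNat, by omega⟩ (by simp; omega)
      (by simp; omega)

-- membership of the rotated word in the list is a hit of the normalized word
theorem contains_eq_hit (x : List Char) (hx : x.all PySem.Chars.islower = true)
    (num : Int) (h1 : 1 ≤ num) (h2 : num < 26) :
    pvWordA.contains (String.ofList (x.map (pvShiftC num))) = hitL pvWordsB x num := by
  have hW : ∀ d ∈ pvWordsB, d.toList.all PySem.Chars.islower = true := by decide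
  have hWA : pvWordA = pvWordsB := rfl
  rw [Bool.eq_iff_iff, hWA]
  simp only [hitL, List.any_eq_true, List.contains_iff_exists_mem_beq, beq_iff_eq]
  constructor
  · rintro ⟨d, hd, heq⟩
    refine ⟨d, hd, ?_⟩
    exact (rotate_eq_iff x hx d.toList (hW d hd) num h1 h2).mp
      (by rw [← String.ofList_inj, String.ofList_toList]; exact heq)
  · rintro ⟨d, hd, heq⟩
    refine ⟨d, hd, ?_⟩
    rw [← String.toList_inj, String.toList_ofList]
    exact (rotate_eq_iff x hx d.toList (hW d hd) num h1 h2).mpr heq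

-- the inner rotation scan is firstHit of the normalized word
theorem frInnerA_eq (i : String) (l : List Int) (hl : ∀ n ∈ l, 1 ≤ n ∧ n < 26) :
    frInnerA i l = firstHit (pvNormStr i).toList l := by
  induction l with
  | nil => rfl
  | cons n rest ih =>
    obtain ⟨hn1, hn2⟩ := hl n (List.mem_cons_self ..)
    unfold frInnerA firstHit
    rw [caesar_eq i n hn1 hn2, contains_eq_hit _ (norm_all_islower i) n hn1 hn2,
      ih (fun m hm => hl m (List.mem_cons_of_mem _ hm))]

-- one pass of inserts for a fixed shift s
theorem get?_words_fold (ds : List String) (t : PySem.Dict String Int) (x : List Char) (s : Int) :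
    (ds.foldl (fun t d => t.insert (pvKey s d) s) t).get? (String.ofList x) =
      if hitL ds x s then some s else t.get? (String.ofList x) := by
  induction ds generalizing t with
  | nil => simp [hitL]
  | cons d ds ih =>
    simp only [List.foldl_cons]
    rw [ih, PySem.Dict.get?_insert]
    by_cases h1 : hitL ds x s = true <;>
      by_cases h2 : x = d.toList.map (pvShiftC (26 - s)) <;>
        simp [hitL, pvKey, String.ofList_inj, h2]

theorem firstHit_append (x : List Char) (a b : List Int) :
    firstHit x (a ++ b) = (firstHit x a).or (firstHit x b) := by
  induction a with
  | nil => simp [firstHit]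
  | cons s l ih =>
    rw [List.cons_append]
    by_cases h : hitL pvWordsB x s = true
    · simp [firstHit, h]
    · rw [show firstHit x (s :: (l ++ b)) = firstHit x (l ++ b) from by simp [firstHit, h],
        show firstHit x (s :: l) = firstHit x l from by simp [firstHit, h], ih]

-- the whole table build: later (smaller) shifts overwrite earlier ones
theorem get?_range_fold (l : List Int) (t : PySem.Dict String Int) (x : List Char) :
    ((l.foldl (fun t s => pvWordsB.foldl (fun t d => t.insert (pvKey s d) s) t) t).get?
        (String.ofList x)) =
      (firstHit x l.reverse).or (t.get? (String.ofList x)) := by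
  induction l generalizing t with
  | nil => simp [firstHit]
  | cons s l ih =>
    simp only [List.foldl_cons, List.reverse_cons]
    rw [ih, get?_words_fold, firstHit_append]
    by_cases h : hitL pvWordsB x s = true <;>
      cases hfh : firstHit x l.reverse <;> simp [firstHit, h, Option.or]

set_option maxRecDepth 8192 in
theorem tableGet (x : List Char) :
    pvTable.get? (String.ofList x) = firstHit x (PySem.List.pyRange 1 26 1) := by
  unfold pvTable
  rw [get?_range_fold]
  have hrev : (PySem.List.pyRange 25 0 (-1)).reverse = PySem.List.pyRange 1 26 1 := by decide
  have hemp : (PySem.Dict.empty : PySem.Dict String Int).get? (String.ofList x) = none := rfl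
  rw [hrev, hemp]
  cases firstHit x (PySem.List.pyRange 1 26 1) <;> rfl

set_option maxRecDepth 100000 in
theorem frOuter_eq (ws : List String) : frOuterA ws = frOuterB ws := by
  induction ws with
  | nil => rfl
  | cons w rest ih =>
    simp only [frOuterA, frOuterB]
    rw [frInnerA_eq w _ (fun n hn => by rw [PySem.List.mem_pyRange_one] at hn; omega)]
    have ht := tableGet (pvNormStr w).toList
    rw [String.ofList_toList] at ht
    rw [ht]
    cases firstHit (pvNormStr w).toList (PySem.List.pyRange 1 26 1) <;> simp [pvIfSome, ih]

-- ===== VERDICT (by name: the statement is the Claim_ definition above) =====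
theorem find_rotate_spec : Claim_equal_find_rotate := by
  intro text _
  unfold Spec_find_rotate find_rotate find_rotate_alt
  exact frOuter_eq _
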